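-- pv_equiv track=rewrite | github.com/Massprod/leetcode-testing | leetcode_problems/p1296_divide_array_in_sets_of_k_consecutive_numbers.py | is_n_straights
-- ===== SOURCE A (Python) =====
-- from collections import defaultdict
--
-- def is_n_straights(hand: list[int], group_size: int) -> bool:
--     # working_sol (79.91%, 87.55%) -> (325ms, 33.90mb)  time: O(n * log n) | space: O(n)
--     if 1 == group_size:
--         return True
--     # {symbol: occurrences}
--     occurrences: dict[int, int] = defaultdict(int)
--     for val in hand:
--         occurrences[val] += 1
--     # We need consecutive, so it's the best way to start from lowest
--     #  and take what we need in order.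
--     hand.sort()
--     cur_group: int = 0
--     for num in hand:
--         if 0 == occurrences[num]:
--             continue
--         if 0 == cur_group:
--             cur_group += 1
--             occurrences[num] -= 1
--         _next: int = num
--         # We should always use every symbol we can, and it's consecutive cards == diff by 1 left -> right.
--         while cur_group != group_size:
--             _next += + 1
--             if _next in occurrences and occurrences[_next] > 0:
--                 cur_group += 1
--                 occurrences[_next] -= 1
--             # If we can't build a group with `group_size` == we can't rearrange them correctly.
--             else:
--                 return False
--         cur_group = 0
--     return True
-- ===== SOURCE B (Python) =====
-- from collections import defaultdict
--
-- def is_n_straights(hand: list[int], group_size: int) -> bool: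
--     # Batch greedy over distinct values: consume all c copies of the smallest
--     # remaining value at once, requiring c copies of each of the next
--     # group_size-1 consecutive values.
--     if 1 == group_size:
--         return True
--     counts = defaultdict(int)
--     for val in hand:
--         counts[val] += 1
--     hand.sort()  # keep A's observable in-place mutation of the argument
--     for v in sorted(counts):
--         c = counts[v]
--         if c == 0:
--             continue
--         for j in range(1, group_size):
--             if counts[v + j] < c:
--                 return False
--             counts[v + j] -= c
--         counts[v] = 0
--     return True
-- ===== Notes on version B (the rewrite author's own statement) =====
-- stated objective: alternative
-- what changed: A assembles one group per card (an inner while walk per hand entry); B iterates once over the distinct values in increasing order and consumes all c copies of a value in a single batch subtraction over the next group_size-1 counts.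
-- outside the precondition, e.g. on is_n_straights([5], 0): A returns False, B returns True; on is_n_straights([1, 2], -3): A returns False, B returns True
import Mathlib
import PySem

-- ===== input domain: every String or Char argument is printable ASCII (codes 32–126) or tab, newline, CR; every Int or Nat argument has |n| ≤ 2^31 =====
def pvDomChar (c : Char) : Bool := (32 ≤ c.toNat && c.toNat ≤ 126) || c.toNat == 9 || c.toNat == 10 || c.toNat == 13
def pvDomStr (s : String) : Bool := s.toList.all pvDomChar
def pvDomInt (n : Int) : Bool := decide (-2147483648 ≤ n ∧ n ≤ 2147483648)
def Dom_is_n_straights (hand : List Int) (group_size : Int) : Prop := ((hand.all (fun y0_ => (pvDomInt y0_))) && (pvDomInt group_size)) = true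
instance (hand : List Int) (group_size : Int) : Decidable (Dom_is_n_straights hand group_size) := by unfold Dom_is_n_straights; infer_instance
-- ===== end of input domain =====

-- B replaces A's card-by-card greedy (one inner while loop per card) with a batch greedy over the
-- distinct values, consuming all c copies of a value at once; equivalence is about the return value —
-- both Pythons also sort `hand` in place (identically) when group_size ≠ 1.

-- ===== PORT A =====
-- upper bound on the keys of a dict, used only as a termination measure for the while loop
def pvKeyBound (d : PySem.Dict Int Int) : Int := d.keys.foldl max 0

-- the `while cur_group != group_size:` loop of A; `none` = the `return False` exit.
-- Structural recursion on a fuel that provably suffices: each iteration either stops or moves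
-- `next` past another key of the dict while `cur` grows towards `group_size`.
def pvWhileA (fuel : Nat) (occ : PySem.Dict Int Int) (cur next gs : Int) :
    Option (PySem.Dict Int Int) :=
  match fuel with
  | 0 => none
  | fuel + 1 =>
    if cur = gs then some occ
    else if occ.contains (next + 1) && decide (0 < occ.getD (next + 1) 0) then
      pvWhileA fuel (occ.modify (next + 1) 0 (· - 1)) (cur + 1) (next + 1) gs
    else none

-- the `for num in hand:` loop of A
def pvLoopA (nums : List Int) (occ : PySem.Dict Int Int) (cur gs : Int) : Bool :=
  match nums with
  | [] => true
  | num :: rest =>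
    if occ.getD num 0 = 0 then pvLoopA rest occ cur gs
    else
      let p := if cur = 0 then (occ.modify num 0 (· - 1), cur + 1) else (occ, cur)
      match pvWhileA ((pvKeyBound p.1 - num).toNat + (gs - p.2).toNat + 1) p.1 p.2 num gs with
      | none => false
      | some occ2 => pvLoopA rest occ2 0 gs

def is_n_straights (hand : List Int) (group_size : Int) : Bool :=
  if 1 = group_size then true
  else
    -- hand.sort() mutates the Python argument; only the sorted list matters for the result
    pvLoopA (PySem.List.sorted hand (fun x => x) false)
      (hand.foldl (fun d v => d.modify v 0 (· + 1)) PySem.Dict.empty) 0 group_size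

-- ===== PORT B =====
-- the `for j in range(1, group_size):` loop of B; `none` = the `return False` exit
def pvInnerB (counts : PySem.Dict Int Int) (v c : Int) : List Int → Option (PySem.Dict Int Int)
  | [] => some counts
  | j :: rest =>
    if counts.getD (v + j) 0 < c then none
    else pvInnerB (counts.modify (v + j) 0 (· - c)) v c rest

-- the `for v in sorted(counts):` loop of B
def pvLoopB (vals : List Int) (counts : PySem.Dict Int Int) (gs : Int) : Bool :=
  match vals with
  | [] => true
  | v :: rest =>
    let c := counts.getD v 0
    if c = 0 then pvLoopB rest counts gs
    else match pvInnerB counts v c (PySem.List.pyRange 1 gs 1) with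
      | none => false
      | some counts' => pvLoopB rest (counts'.insert v 0) gs

def is_n_straights_alt (hand : List Int) (group_size : Int) : Bool :=
  if 1 = group_size then true
  else
    -- hand.sort() in Source B mutates the argument exactly as A does; return value unaffected
    pvLoopB
      (PySem.List.sorted
        ((hand.foldl (fun d x => d.modify x 0 (· + 1)) PySem.Dict.empty : PySem.Dict Int Int)).keys
        (fun x => x) false)
      (hand.foldl (fun d x => d.modify x 0 (· + 1)) PySem.Dict.empty) group_size

-- ===== PRECONDITION & SPEC =====
-- Pre_ excludes group_size < 1 with a nonempty hand: a malformed group size outside the task's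
-- domain, where A's False (its scan hits a gap) and B's True (no group to form) are both accidents.
def Pre_is_n_straights (hand : List Int) (group_size : Int) : Prop := 1 ≤ group_size ∨ hand = []
instance (hand : List Int) (group_size : Int) : Decidable (Pre_is_n_straights hand group_size) := by unfold Pre_is_n_straights; infer_instance
def pvWitness_is_n_straights : List Int × Int := ([2, 3, 4, 3, 4, 5], 3)

def Spec_is_n_straights (hand : List Int) (group_size : Int) (out : Bool) : Prop := out = is_n_straights_alt hand group_size
instance (hand : List Int) (group_size : Int) (out : Bool) : Decidable (Spec_is_n_straights hand group_size out) := by unfold Spec_is_n_straights; infer_instance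

-- ===== CLAIM (what is proved, stated in full; the proofs are below) =====
def Claim_equal_is_n_straights : Prop := ∀ (hand : List Int) (group_size : Int), Dom_is_n_straights hand group_size → Pre_is_n_straights hand group_size → Spec_is_n_straights hand group_size (is_n_straights hand group_size)

-- ===== LEMMAS AND PROOFS =====

-- the count-view of a dict: what both loops actually read and write
def pvF (d : PySem.Dict Int Int) : Int → Int := fun w => d.getD w 0

-- the common greedy, on views: consume f v copies of v, needing f v of each of v+1..v+gs-1
def pvUpd (f : Int → Int) (v r gs : Int) : Int → Int :=
  fun w => if w = v then 0 else if v < w ∧ w < v + gs then f w - r else f w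

def pvG (gs : Int) : List Int → (Int → Int) → Bool
  | [], _ => true
  | v :: vs, f =>
    if f v = 0 then pvG gs vs f
    else if (PySem.List.pyRange 1 gs 1).all (fun j => decide (f v ≤ f (v + j))) then
      pvG gs vs (pvUpd f v (f v) gs)
    else false

theorem pv_guard_eq (d : PySem.Dict Int Int) (k : Int) :
    (d.contains k && decide (0 < d.getD k 0)) = decide (0 < d.getD k 0) := by
  cases h : d.contains k
  · have h0 : d.getD k 0 = 0 := PySem.Dict.getD_of_not_contains d 0 h
    simp [h0]
  · simp

theorem pvWhileA_spec (gs : Int) : ∀ (k : Nat) (cur next : Int) (d : PySem.Dict Int Int)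
    (fuel : Nat), cur ≤ gs → (gs - cur).toNat = k →
    ((∃ j : Int, 1 ≤ j ∧ j ≤ gs - cur ∧ pvF d (next + j) ≤ 0 ∧ j.toNat < fuel) →
        pvWhileA fuel d cur next gs = none)
    ∧ ((∀ j : Int, 1 ≤ j → j ≤ gs - cur → 1 ≤ pvF d (next + j)) → k < fuel →
        ∃ d', pvWhileA fuel d cur next gs = some d' ∧
          ∀ w, pvF d' w = if next < w ∧ w ≤ next + (gs - cur) then pvF d w - 1 else pvF d w) := by
  intro k
  induction k with
  | zero =>
    intro cur next d fuel hle hk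
    constructor
    · rintro ⟨j, hj1, hj2, _, _⟩; omega
    · intro _ hfuel
      obtain ⟨f, rfl⟩ : ∃ f, fuel = f + 1 := ⟨fuel - 1, by omega⟩
      refine ⟨d, by rw [pvWhileA]; rw [if_pos (by omega : cur = gs)], ?_⟩
      intro w; rw [if_neg (by omega)]
  | succ k ih =>
    intro cur next d fuel hle hk
    have hcur : cur ≠ gs := by omega
    constructor
    · rintro ⟨j, hj1, hj2, hj0, hjf⟩
      obtain ⟨f, rfl⟩ : ∃ f, fuel = f + 1 := ⟨fuel - 1, by omega⟩
      rw [pvWhileA, if_neg hcur, pv_guard_eq]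
      simp only [decide_eq_true_eq]
      by_cases hg : 0 < d.getD (next + 1) 0
      · rw [if_pos hg]
        set d1 := d.modify (next + 1) 0 (· - 1) with hd1
        have hview : ∀ w, pvF d1 w = if w = next + 1 then pvF d w - 1 else pvF d w := by
          intro w
          simp only [pvF, hd1, PySem.Dict.getD_modify]
          split_ifs with h <;> simp [h]
        have hj : j ≠ 1 := by
          intro h; subst h
          have : pvF d (next + 1) ≤ 0 := hj0
          simp only [pvF] at this; omega
        apply (ih (cur + 1) (next + 1) d1 f (by omega) (by omega)).1
        refine ⟨j - 1, by omega, by omega, ?_, by omega⟩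
        have he : next + 1 + (j - 1) = next + j := by ring
        rw [he, hview]
        rw [if_neg (by omega)]
        exact hj0
      · rw [if_neg hg]
    · intro hall hfuel
      obtain ⟨f, rfl⟩ : ∃ f, fuel = f + 1 := ⟨fuel - 1, by omega⟩
      have hstep : pvWhileA (f + 1) d cur next gs
          = if 0 < d.getD (next + 1) 0 then
              pvWhileA f (d.modify (next + 1) 0 (· - 1)) (cur + 1) (next + 1) gs
            else none := by
        rw [pvWhileA, if_neg hcur, pv_guard_eq]
        simp only [decide_eq_true_eq]
      have hg : 0 < d.getD (next + 1) 0 := by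
        have := hall 1 (by omega) (by omega)
        simp only [pvF] at this; omega
      set d1 := d.modify (next + 1) 0 (· - 1) with hd1
      have hview : ∀ w, pvF d1 w = if w = next + 1 then pvF d w - 1 else pvF d w := by
        intro w
        simp only [pvF, hd1, PySem.Dict.getD_modify]
        split_ifs with h <;> simp [h]
      have hallrec : ∀ j : Int, 1 ≤ j → j ≤ gs - (cur + 1) → 1 ≤ pvF d1 (next + 1 + j) := by
        intro j h1 h2
        have h3 := hall (j + 1) (by omega) (by omega)
        rw [hview, if_neg (by omega)]
        have he : next + 1 + j = next + (j + 1) := by ring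
        rw [he]; exact h3
      obtain ⟨d', hrun, hv⟩ :=
        (ih (cur + 1) (next + 1) d1 f (by omega) (by omega)).2 hallrec (by omega)
      refine ⟨d', by rw [hstep, if_pos hg]; exact hrun, ?_⟩
      intro w
      rw [hv w, hview w]
      have hg' : 1 ≤ pvF d (next + 1) := hg
      split_ifs <;> omega

theorem pvInnerB_spec (gs v c : Int) : ∀ (k : Nat) (a : Int) (d : PySem.Dict Int Int),
    (gs - a).toNat = k →
    ((∃ j : Int, a ≤ j ∧ j < gs ∧ pvF d (v + j) < c) → pvInnerB d v c (PySem.List.pyRange a gs 1) = none)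
    ∧ ((∀ j : Int, a ≤ j → j < gs → c ≤ pvF d (v + j)) →
        ∃ d', pvInnerB d v c (PySem.List.pyRange a gs 1) = some d' ∧
          ∀ w, pvF d' w = if v + a ≤ w ∧ w < v + gs then pvF d w - c else pvF d w) := by
  intro k
  induction k with
  | zero =>
    intro a d hk
    have hnil : PySem.List.pyRange a gs 1 = [] := by
      rw [PySem.List.pyRange_one, hk]
      rfl
    rw [hnil]
    constructor
    · rintro ⟨j, hj1, hj2, _⟩; omega
    · intro _
      refine ⟨d, rfl, ?_⟩
      intro w; rw [if_neg (by omega)]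
  | succ k ih =>
    intro a d hk
    have ha : a < gs := by omega
    have hcons : PySem.List.pyRange a gs 1 = a :: PySem.List.pyRange (a + 1) gs 1 :=
      PySem.List.pyRange_one_cons ha
    rw [hcons]
    set d1 := d.modify (v + a) 0 (· - c) with hd1
    have hview : ∀ w, pvF d1 w = if w = v + a then pvF d w - c else pvF d w := by
      intro w
      simp only [pvF, hd1, PySem.Dict.getD_modify]
      split_ifs with h <;> simp [h]
    obtain ⟨ihN, ihS⟩ := ih (a + 1) d1 (by omega)
    constructor
    · rintro ⟨j, hj1, hj2, hj0⟩
      by_cases hj : j = a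
      · subst hj
        simp only [pvInnerB]
        rw [if_pos (by exact hj0)]
      · simp only [pvInnerB]
        split
        · rfl
        · apply ihN
          refine ⟨j, by omega, hj2, ?_⟩
          rw [hview, if_neg (by intro h; apply hj; omega)]
          exact hj0
    · intro hall
      have hhead : ¬ (d.getD (v + a) 0 < c) := by
        have := hall a (le_refl a) ha
        simp only [pvF] at this; omega
      have hallrec : ∀ j : Int, a + 1 ≤ j → j < gs → c ≤ pvF d1 (v + j) := by
        intro j h1 h2
        rw [hview, if_neg (by intro h; omega)]
        exact hall j (by omega) h2
      obtain ⟨d', hrun, hv⟩ := ihS hallrec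
      refine ⟨d', ?_, ?_⟩
      · simp only [pvInnerB]
        rw [if_neg hhead]
        exact hrun
      · intro w
        rw [hv w, hview w]
        have hge : c ≤ pvF d (v + a) := hall a (le_refl a) ha
        split_ifs <;> omega

theorem pvLoopB_eq_pvG (gs : Int) : ∀ (vs : List Int) (d : PySem.Dict Int Int),
    pvLoopB vs d gs = pvG gs vs (pvF d) := by
  intro vs
  induction vs with
  | nil => intro d; rfl
  | cons v rest ih =>
    intro d
    simp only [pvLoopB, pvG]
    have hFv : pvF d v = d.getD v 0 := rfl
    rw [hFv]
    by_cases h0 : d.getD v 0 = 0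
    · rw [if_pos h0, if_pos h0, ih]
    · rw [if_neg h0, if_neg h0]
      by_cases hall : ∀ j : Int, 1 ≤ j → j < gs → d.getD v 0 ≤ pvF d (v + j)
      · obtain ⟨d', hrun, hv⟩ :=
          (pvInnerB_spec gs v (d.getD v 0) (gs - 1).toNat 1 d (by omega)).2 hall
        rw [hrun]
        have hcheck : ((PySem.List.pyRange 1 gs 1).all
            (fun j => decide (d.getD v 0 ≤ pvF d (v + j)))) = true := by
          rw [List.all_eq_true]
          intro j hj
          rw [PySem.List.mem_pyRange_one] at hj
          exact decide_eq_true (hall j hj.1 hj.2)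
        rw [hcheck, if_pos rfl]
        show pvLoopB rest (d'.insert v 0) gs = _
        rw [ih]
        congr 1
        funext w
        by_cases hw : w = v
        · subst hw
          simp [pvF, PySem.Dict.getD_insert_self, pvUpd]
        · show (d'.insert v 0).getD w 0 = _
          rw [PySem.Dict.getD_insert_of_ne d' 0 0 hw]
          have hvw := hv w
          simp only [pvF] at hvw
          rw [pvUpd, hvw]
          simp only [pvF]
          split_ifs <;> omega
      · push_neg at hall
        obtain ⟨j, hj1, hj2, hjlt⟩ := hall
        rw [(pvInnerB_spec gs v (d.getD v 0) (gs - 1).toNat 1 d (by omega)).1 ⟨j, hj1, hj2, hjlt⟩]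
        show false = _
        have hcheck : ((PySem.List.pyRange 1 gs 1).all
            (fun j => decide (d.getD v 0 ≤ pvF d (v + j)))) = false := by
          rw [List.all_eq_false]
          refine ⟨j, PySem.List.mem_pyRange_one.mpr ⟨hj1, hj2⟩, ?_⟩
          simp only [pvF] at hjlt ⊢
          simp only [decide_eq_true_eq]
          omega
        rw [hcheck, if_neg (by simp)]

theorem pvLoopA_skip (gs v cur : Int) : ∀ (n : Nat) (l : List Int) (d : PySem.Dict Int Int),
    pvF d v = 0 → pvLoopA (List.replicate n v ++ l) d cur gs = pvLoopA l d cur gs := by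
  intro n
  induction n with
  | zero => intro l d _; rfl
  | succ n ih =>
    intro l d h
    rw [List.replicate_succ, List.cons_append]
    simp only [pvLoopA]
    rw [if_pos (by exact h)]
    exact ih l d h

theorem pvBlockA (gs v : Int) (hgs : 2 ≤ gs) (vs : List Int) (m : Int → Nat)
    (IH : ∀ d : PySem.Dict Int Int, (∀ w, 0 ≤ pvF d w) → (∀ u ∈ vs, pvF d u ≤ (m u : Int)) →
      pvLoopA (vs.flatMap fun u => List.replicate (m u) u) d 0 gs = pvG gs vs (pvF d)) :
    ∀ (k n : Nat) (d : PySem.Dict Int Int), (pvF d v).toNat = k →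
      (∀ w, 0 ≤ pvF d w) → pvF d v ≤ (n : Int) → (∀ u ∈ vs, pvF d u ≤ (m u : Int)) →
      pvLoopA (List.replicate n v ++ vs.flatMap fun u => List.replicate (m u) u) d 0 gs
        = pvG gs (v :: vs) (pvF d) := by
  intro k
  induction k with
  | zero =>
    intro n d hk hnn hle hinv
    have h0 : pvF d v = 0 := by have := hnn v; omega
    rw [pvLoopA_skip gs v 0 n _ d h0, IH d hnn hinv]
    simp only [pvG]
    rw [if_pos h0]
  | succ k ihk =>
    intro n d hk hnn hle hinv
    have hr : 1 ≤ pvF d v := by have := hnn v; omega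
    obtain ⟨n', rfl⟩ : ∃ n', n = n' + 1 := ⟨n - 1, by omega⟩
    rw [List.replicate_succ, List.cons_append]
    have hne : ¬ d.getD v 0 = 0 := by simp only [pvF] at hr; omega
    simp only [pvLoopA, hne, if_false, if_true, zero_add]
    set d1 := d.modify v 0 (· - 1) with hd1
    have hview1 : ∀ w, pvF d1 w = if w = v then pvF d w - 1 else pvF d w := by
      intro w
      simp only [pvF, hd1, PySem.Dict.getD_modify]
      split_ifs with h <;> simp [h]
    by_cases hok : ∀ j : Int, 1 ≤ j → j ≤ gs - 1 → 1 ≤ pvF d1 (v + j)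
    · obtain ⟨d2, hrun, hv2⟩ :=
        (pvWhileA_spec gs (gs - 1).toNat 1 v d1
          ((pvKeyBound d1 - v).toNat + (gs - 1).toNat + 1) (by omega) (by omega)).2 hok
          (by omega)
      rw [hrun]
      show pvLoopA (List.replicate n' v ++ _) d2 0 gs = _
      have hF2 : ∀ w, pvF d2 w = if w = v then pvF d v - 1
          else if v < w ∧ w < v + gs then pvF d w - 1 else pvF d w := by
        intro w
        rw [hv2 w, hview1 w]
        by_cases hw : w = v
        · subst hw; split_ifs <;> omega
        · split_ifs <;> omega
      have hok' : ∀ w : Int, v < w → w < v + gs → 1 ≤ pvF d w := by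
        intro w h1 h2
        have := hok (w - v) (by omega) (by omega)
        rw [hview1, if_neg (by omega)] at this
        have he : v + (w - v) = w := by ring
        rw [he] at this
        exact this
      have hstep := ihk n' d2
        (by rw [hF2, if_pos rfl]; omega)
        (by intro w; rw [hF2]; split_ifs with h1 h2
            · omega
            · have := hok' w h2.1 h2.2; omega
            · exact hnn w)
        (by rw [hF2, if_pos rfl]; omega)
        (by intro u hu; have := hinv u hu
            by_cases huv : u = v
            · subst huv; rw [hF2, if_pos rfl]; omega
            · rw [hF2, if_neg huv]; split_ifs <;> omega)
      rw [hstep]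
      -- pvG over the once-decremented view equals pvG over the original view
      by_cases hr1 : pvF d v = 1
      · simp only [pvG]
        have hA : pvF d2 v = 0 := by rw [hF2, if_pos rfl]; omega
        rw [if_pos hA, if_neg (show ¬ pvF d v = 0 by omega)]
        have hcheckT : ((PySem.List.pyRange 1 gs 1).all
            (fun j => decide (pvF d v ≤ pvF d (v + j)))) = true := by
          rw [List.all_eq_true]
          intro j hj
          rw [PySem.List.mem_pyRange_one] at hj
          have := hok' (v + j) (by omega) (by omega)
          exact decide_eq_true (by omega)
        rw [hcheckT, if_pos rfl]
        congr 1
        funext w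
        rw [hF2 w, pvUpd]
        split_ifs <;> omega
      · simp only [pvG]
        have hA : ¬ pvF d2 v = 0 := by rw [hF2, if_pos rfl]; omega
        rw [if_neg hA, if_neg (show ¬ pvF d v = 0 by omega)]
        by_cases hc : ∀ j : Int, 1 ≤ j → j < gs → pvF d v ≤ pvF d (v + j)
        · have hT1 : ((PySem.List.pyRange 1 gs 1).all
              (fun j => decide (pvF d2 v ≤ pvF d2 (v + j)))) = true := by
            rw [List.all_eq_true]
            intro j hj
            rw [PySem.List.mem_pyRange_one] at hj
            have h1 := hc j hj.1 hj.2
            have h2 := hF2 (v + j)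
            rw [if_neg (by omega), if_pos (by omega)] at h2
            have h3 := hF2 v
            rw [if_pos rfl] at h3
            exact decide_eq_true (by omega)
          have hT2 : ((PySem.List.pyRange 1 gs 1).all
              (fun j => decide (pvF d v ≤ pvF d (v + j)))) = true := by
            rw [List.all_eq_true]
            intro j hj
            rw [PySem.List.mem_pyRange_one] at hj
            exact decide_eq_true (hc j hj.1 hj.2)
          rw [hT1, hT2, if_pos rfl, if_pos rfl]
          congr 1
          funext w
          rw [pvUpd, pvUpd, hF2 w, hF2 v, if_pos rfl]
          split_ifs <;> omega
        · push_neg at hc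
          obtain ⟨j, hj1, hj2, hjlt⟩ := hc
          have hF1 : ((PySem.List.pyRange 1 gs 1).all
              (fun j => decide (pvF d2 v ≤ pvF d2 (v + j)))) = false := by
            rw [List.all_eq_false]
            refine ⟨j, PySem.List.mem_pyRange_one.mpr ⟨hj1, hj2⟩, ?_⟩
            have h2 := hF2 (v + j)
            rw [if_neg (by omega), if_pos (by omega)] at h2
            have h3 := hF2 v
            rw [if_pos rfl] at h3
            simp only [decide_eq_true_eq]
            omega
          have hF1' : ((PySem.List.pyRange 1 gs 1).all
              (fun j => decide (pvF d v ≤ pvF d (v + j)))) = false := by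
            rw [List.all_eq_false]
            refine ⟨j, PySem.List.mem_pyRange_one.mpr ⟨hj1, hj2⟩, ?_⟩
            simp only [decide_eq_true_eq]
            omega
          rw [hF1, hF1', if_neg (by simp), if_neg (by simp)]
    · push_neg at hok
      obtain ⟨j, hj1, hj2, hjle⟩ := hok
      rw [(pvWhileA_spec gs (gs - 1).toNat 1 v d1
          ((pvKeyBound d1 - v).toNat + (gs - 1).toNat + 1) (by omega) (by omega)).1
        ⟨j, hj1, by omega, by omega, by omega⟩]
      show false = _
      have hjd : pvF d (v + j) ≤ 0 := by
        have := hview1 (v + j)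
        rw [if_neg (by omega)] at this
        omega
      simp only [pvG]
      rw [if_neg (show ¬ pvF d v = 0 by omega)]
      have hcheckF : ((PySem.List.pyRange 1 gs 1).all
          (fun j => decide (pvF d v ≤ pvF d (v + j)))) = false := by
        rw [List.all_eq_false]
        refine ⟨j, PySem.List.mem_pyRange_one.mpr ⟨hj1, by omega⟩, ?_⟩
        simp only [decide_eq_true_eq]
        omega
      rw [hcheckF, if_neg (by simp)]

theorem pvLoopA_eq_pvG (gs : Int) (hgs : 2 ≤ gs) : ∀ (vs : List Int) (m : Int → Nat)
    (d : PySem.Dict Int Int), (∀ w, 0 ≤ pvF d w) → (∀ u ∈ vs, pvF d u ≤ (m u : Int)) →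
    pvLoopA (vs.flatMap fun u => List.replicate (m u) u) d 0 gs = pvG gs vs (pvF d) := by
  intro vs
  induction vs with
  | nil => intro m d _ _; rfl
  | cons v rest ih =>
    intro m d hnn hinv
    rw [List.flatMap_cons]
    exact pvBlockA gs v hgs rest m (fun d' h1 h2 => ih m d' h1 h2)
      (pvF d v).toNat (m v) d rfl hnn (hinv v (List.mem_cons_self))
      (fun u hu => hinv u (List.mem_cons_of_mem _ hu))

theorem pv_count_flat (w : Int) : ∀ (vs : List Int) (m : Int → Nat), vs.Nodup →
    List.count w (vs.flatMap fun v => List.replicate (m v) v) = if w ∈ vs then m w else 0 := by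
  intro vs
  induction vs with
  | nil => intro m _; simp
  | cons v rest ih =>
    intro m hnd
    rw [List.flatMap_cons, List.count_append, ih m hnd.of_cons]
    by_cases hw : w = v
    · subst hw
      rw [List.count_replicate, if_pos (by simp), if_pos (List.mem_cons_self),
        if_neg (by simpa using (List.nodup_cons.mp hnd).1)]
      simp
    · rw [List.count_replicate]
      have h1 : ¬ ((v == w) = true) := by
        simp only [beq_iff_eq]
        exact fun h => hw h.symm
      rw [if_neg h1]
      by_cases hm : w ∈ rest
      · rw [if_pos hm, if_pos (List.mem_cons_of_mem _ hm)]
        simp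
      · rw [if_neg hm, if_neg (by simp [hw, hm])]

theorem pv_pairwise_flat : ∀ (vs : List Int) (m : Int → Nat), vs.Pairwise (· < ·) →
    (vs.flatMap fun v => List.replicate (m v) v).Pairwise (· ≤ ·) := by
  intro vs
  induction vs with
  | nil => intro m _; simp
  | cons v rest ih =>
    intro m hp
    rw [List.flatMap_cons, List.pairwise_append]
    refine ⟨List.pairwise_replicate.mpr (Or.inr (le_refl v)), ih m hp.of_cons, ?_⟩
    intro x hx y hy
    obtain ⟨u, hu, hyu⟩ := List.mem_flatMap.mp hy
    rw [List.eq_of_mem_replicate hx, List.eq_of_mem_replicate hyu]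
    exact le_of_lt (List.rel_of_pairwise_cons hp hu)

-- sorted hand is the blocks of its sorted distinct values
theorem pv_sorted_flat (hand : List Int) :
    PySem.List.sorted hand (fun x => x) false
      = (PySem.List.sorted (PySem.Set.ofList hand) (fun x => x) false).flatMap
          (fun v => List.replicate (hand.count v) v) := by
  have hnd : (PySem.List.sorted (PySem.Set.ofList hand) (fun x => x) false).Nodup :=
    ((PySem.List.sorted_perm (PySem.Set.ofList hand) (fun x => x) false).nodup_iff).mpr
      (PySem.Set.nodup_ofList hand)
  have hlt : (PySem.List.sorted (PySem.Set.ofList hand) (fun x => x) false).Pairwise (· < ·) := by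
    have hle := PySem.List.sorted_pairwise (PySem.Set.ofList hand) (fun x => x)
    exact (hle.and hnd).imp (fun h => lt_of_le_of_ne h.1 h.2)
  apply PySem.List.eq_of_perm_of_pairwise_le_of_injective (fun x : Int => x)
    (fun a b h => h)
  · -- permutation: both are permutations of hand
    refine (PySem.List.sorted_perm hand (fun x => x) false).trans ?_
    rw [List.perm_iff_count]
    intro a
    rw [pv_count_flat a _ _ hnd]
    have hmem : a ∈ PySem.List.sorted (PySem.Set.ofList hand) (fun x => x) false ↔ a ∈ hand := by
      rw [(PySem.List.sorted_perm (PySem.Set.ofList hand) (fun x => x) false).mem_iff,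
        PySem.Set.mem_ofList]
    by_cases ha : a ∈ hand
    · rw [if_pos (hmem.mpr ha)]
    · rw [if_neg (fun hx => ha (hmem.mp hx)), List.count_eq_zero.mpr ha]
  · exact PySem.List.sorted_pairwise hand (fun x => x)
  · exact pv_pairwise_flat _ _ hlt

theorem is_n_straights_eq (hand : List Int) (group_size : Int)
    (h : 1 ≤ group_size ∨ hand = []) :
    is_n_straights hand group_size = is_n_straights_alt hand group_size := by
  by_cases h1 : (1 : Int) = group_size
  · simp only [is_n_straights, is_n_straights_alt, if_pos h1]
  · rcases h with hgs | hnil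
    · have hgs2 : 2 ≤ group_size := by omega
      simp only [is_n_straights, is_n_straights_alt, if_neg h1]
      have hK : (PySem.List.sorted
            ((hand.foldl (fun d x => d.modify x 0 (· + 1)) PySem.Dict.empty : PySem.Dict Int Int)).keys
            (fun x => x) false)
          = PySem.List.sorted (PySem.Set.ofList hand) (fun x => x) false :=
        congrArg (fun l => PySem.List.sorted l (fun x => x) false) (PySem.Dict.keys_counter hand)
      rw [pv_sorted_flat hand, hK, pvLoopB_eq_pvG]
      rw [pvLoopA_eq_pvG group_size hgs2 _ (fun v => hand.count v) _
        (by intro w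
            show 0 ≤ (PySem.Dict.counter hand).getD w 0
            rw [PySem.Dict.getD_counter]
            exact Int.natCast_nonneg _)
        (by intro u _
            show (PySem.Dict.counter hand).getD u 0 ≤ _
            rw [PySem.Dict.getD_counter])]
    · subst hnil; rfl

-- ===== VERDICT (by name: the statement is the Claim_ definition above) =====
theorem is_n_straights_spec : Claim_equal_is_n_straights := by
  intro hand gs _ hpre
  unfold Spec_is_n_straights
  exact is_n_straights_eq hand gs hpre
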